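-- pv_equiv track=rewrite | github.com/niusealeo/hyper-dimensional-Phragmen | phragmen/engine.py | tie_break_by_party_order
-- ===== SOURCE A (Python) =====
-- from typing import Dict, List, Optional, Set, Tuple
--
-- def party_rank_maps(party_lists: Dict[str, List[str]]) -> Dict[str, Dict[str, int]]:
--     return {pid: {c: i for i, c in enumerate(lst)} for pid, lst in party_lists.items()}
--
-- def tie_break_by_party_order(tied_candidates: List[str], party_lists: Dict[str, List[str]]) -> str:
--     rank_maps = party_rank_maps(party_lists)
--     best = None  # (rank_index, candidate)
--     for c in tied_candidates:
--         best_rank = None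
--         for rm in rank_maps.values():
--             if c in rm:
--                 r = rm[c]
--                 if best_rank is None or r < best_rank:
--                     best_rank = r
--         if best_rank is not None:
--             key = (best_rank, c)
--             if best is None or key < best:
--                 best = key
--     return best[1] if best is not None else min(tied_candidates)
-- ===== SOURCE B (Python) =====
-- def tie_break_by_party_order(tied_candidates, party_lists):
--     # Merge every party's rank map into one global best-rank index, then take the
--     # minimum (rank, name) key among the tied candidates.
--     best_rank = {}
--     for lst in party_lists.values():
--         for c, i in {c: i for i, c in enumerate(lst)}.items():
--             if c not in best_rank or i < best_rank[c]:
--                 best_rank[c] = i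
--     keyed = [(best_rank[c], c) for c in tied_candidates if c in best_rank]
--     return min(keyed)[1] if keyed else min(tied_candidates)
-- ===== Notes on version B (the rewrite author's own statement) =====
-- stated objective: faster
-- what changed: A loops candidate-outer and, for each tied candidate, rescans every party's rank map for its minimum rank; B merges all per-party rank maps once into a single global best-rank dictionary and then returns the minimum (rank, name) key among the tied candidates, so the per-candidate inner scan over all parties disappears. Pre_ excludes only an empty tied_candidates list, on which A raises ValueError (min([])).
import Mathlib
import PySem

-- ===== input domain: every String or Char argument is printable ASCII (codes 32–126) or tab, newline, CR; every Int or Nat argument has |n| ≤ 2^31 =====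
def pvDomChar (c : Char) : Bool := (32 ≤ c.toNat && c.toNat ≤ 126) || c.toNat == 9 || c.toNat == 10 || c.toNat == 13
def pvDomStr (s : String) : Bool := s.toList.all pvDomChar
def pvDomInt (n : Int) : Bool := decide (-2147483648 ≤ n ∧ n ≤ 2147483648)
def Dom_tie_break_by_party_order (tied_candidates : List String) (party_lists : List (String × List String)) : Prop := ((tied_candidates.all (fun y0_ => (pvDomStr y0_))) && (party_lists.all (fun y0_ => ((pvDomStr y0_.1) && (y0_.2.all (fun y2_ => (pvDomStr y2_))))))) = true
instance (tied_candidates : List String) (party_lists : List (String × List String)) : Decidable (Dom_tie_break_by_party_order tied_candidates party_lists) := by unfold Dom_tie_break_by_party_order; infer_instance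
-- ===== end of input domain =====

-- B merges all per-party rank maps once into a single global best-rank dictionary and takes the
-- minimum (rank, name) key, instead of A's candidate-outer rescan of every rank map (objective: faster).

-- ===== PORT A =====
-- {c: i for i, c in enumerate(lst)} — dict insert overwrites, so the LAST index of a repeated name wins
def pvRankMapOf (lst : List String) : PySem.Dict String Int :=
  (PySem.List.enumerate lst 0).foldl (fun d p => d.insert p.2 p.1) PySem.Dict.empty

def pvBestRankA (rms : List (PySem.Dict String Int)) (c : String) : Option Int :=
  rms.foldl (fun br rm =>
    match rm.get? c with
    | none => br
    | some r =>
      match br with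
      | none => some r
      | some b => if r < b then some r else some b) none

def pvBestStepA (rms : List (PySem.Dict String Int)) (best : Option (Int × String)) (c : String) :
    Option (Int × String) :=
  match pvBestRankA rms c with
  | none => best
  | some r =>
    match best with
    | none => some (r, c)
    | some b => if r < b.1 ∨ (r = b.1 ∧ c < b.2) then some (r, c) else some b  -- Python tuple '<'

def tie_break_by_party_order (tied_candidates : List String) (party_lists : List (String × List String)) : String :=
  -- the outer dict comprehension re-keys by the (already distinct) party ids, so it is a direct map over items
  let rank_maps : PySem.Dict String (PySem.Dict String Int) :=
    PySem.Dict.mk ((PySem.Dict.ofList party_lists).items.map (fun kv => (kv.1, pvRankMapOf kv.2)))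
  match tied_candidates.foldl (pvBestStepA rank_maps.values) none with
  | some b => b.2
  | none => (PySem.List.min? tied_candidates (fun x => x)).getD ""  -- min([]) raises: Pre_ excludes tied_candidates = []

-- ===== PORT B =====
-- 'if c not in best_rank or i < best_rank[c]: best_rank[c] = i' for one item of a rank map
def pvMergeStep (d : PySem.Dict String Int) (kv : String × Int) : PySem.Dict String Int :=
  match d.get? kv.1 with
  | none => d.insert kv.1 kv.2
  | some b => if kv.2 < b then d.insert kv.1 kv.2 else d

def tie_break_by_party_order_alt (tied_candidates : List String) (party_lists : List (String × List String)) : String :=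
  let best_rank : PySem.Dict String Int :=
    (PySem.Dict.ofList party_lists).values.foldl
      (fun d lst => (pvRankMapOf lst).items.foldl pvMergeStep d)
      PySem.Dict.empty
  let keyed := tied_candidates.filterMap (fun c => (best_rank.get? c).map (fun r => (r, c)))
  match PySem.List.min2? keyed (fun p => p.1) (fun p => p.2) with
  | some m => m.2
  | none => (PySem.List.min? tied_candidates (fun x => x)).getD ""  -- min([]) raises: Pre_ excludes tied_candidates = []

-- ===== PRECONDITION & SPEC =====
-- Pre_ excludes only the inputs on which A raises (min([]) on an empty tie): ValueError.
def Pre_tie_break_by_party_order (tied_candidates : List String) (party_lists : List (String × List String)) : Prop :=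
  tied_candidates ≠ []
instance (tied_candidates : List String) (party_lists : List (String × List String)) : Decidable (Pre_tie_break_by_party_order tied_candidates party_lists) := by unfold Pre_tie_break_by_party_order; infer_instance

def pvWitness_tie_break_by_party_order : List String × (List (String × List String)) :=
  (["a", "b"], [("p1", ["b", "a"]), ("p2", ["a"])])

def Spec_tie_break_by_party_order (tied_candidates : List String) (party_lists : List (String × List String)) (out : String) : Prop := out = tie_break_by_party_order_alt tied_candidates party_lists
instance (tied_candidates : List String) (party_lists : List (String × List String)) (out : String) : Decidable (Spec_tie_break_by_party_order tied_candidates party_lists out) := by unfold Spec_tie_break_by_party_order; infer_instance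

-- ===== CLAIM (what is proved, stated in full; the proofs are below) =====
def Claim_equal_tie_break_by_party_order : Prop := ∀ (tied_candidates : List String) (party_lists : List (String × List String)), Dom_tie_break_by_party_order tied_candidates party_lists → Pre_tie_break_by_party_order tied_candidates party_lists → Spec_tie_break_by_party_order tied_candidates party_lists (tie_break_by_party_order tied_candidates party_lists)

-- ===== LEMMAS AND PROOFS =====

-- option-valued running minimum, written exactly as both loops update it
def pvOmin (br : Option Int) (o : Option Int) : Option Int :=
  match o with
  | none => br
  | some r =>
    match br with
    | none => some r
    | some b => some (if r < b then r else b)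

-- the last index of x in lst, read off the reversed enumeration
def pvLastIdx (lst : List String) (x : String) : Option Int :=
  ((PySem.List.enumerate lst 0).reverse.find? (fun p => p.2 == x)).map (·.1)

lemma pv_rm_get (ps : List (Int × String)) (d : PySem.Dict String Int) (x : String) :
    (ps.foldl (fun d p => d.insert p.2 p.1) d).get? x
      = ((ps.reverse.find? (fun p => p.2 == x)).map (·.1)).or (d.get? x) := by
  induction ps generalizing d with
  | nil => simp
  | cons p t ih =>
    simp only [List.foldl_cons, ih, List.reverse_cons, List.find?_append]
    cases h : t.reverse.find? (fun q => q.2 == x) with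
    | some q => simp
    | none =>
      by_cases hx : p.2 = x
      · subst hx
        simp [PySem.Dict.get?_insert_self]
      · have hne : (p.2 == x) = false := by simpa using hx
        simp only [List.find?, hne, Option.map_none, Option.none_or]
        exact PySem.Dict.get?_insert_of_ne d p.1 (Ne.symm hx)

lemma pv_rank_map_get (lst : List String) (x : String) :
    (pvRankMapOf lst).get? x = pvLastIdx lst x := by
  unfold pvRankMapOf pvLastIdx
  rw [pv_rm_get]
  simp [PySem.Dict.empty, PySem.Dict.get?]

lemma pv_rank_map_keys_nodup (lst : List String) : (pvRankMapOf lst).keys.Nodup := by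
  unfold pvRankMapOf
  exact PySem.Dict.nodup_keys_foldl_insert_key (PySem.List.enumerate lst 0) (fun p => p.2)
    (fun _ p => p.1) PySem.Dict.empty PySem.Dict.nodup_keys_empty

lemma pv_merge_get (its : List (String × Int)) (d : PySem.Dict String Int) (x : String)
    (h : (its.map (·.1)).Nodup) :
    (its.foldl pvMergeStep d).get? x = pvOmin (d.get? x) ((PySem.Dict.mk its).get? x) := by
  induction its generalizing d with
  | nil =>
    have hmk : (PySem.Dict.mk ([] : List (String × Int))).get? x = none := by
      rw [PySem.Dict.get?_eq_none_iff_not_mem_keys]; simp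
    rw [hmk]
    rfl
  | cons kv t ih =>
    simp only [List.map_cons, List.nodup_cons] at h
    simp only [List.foldl_cons]
    rw [ih _ h.2, PySem.Dict.get?_mk_cons]
    by_cases hx : kv.1 = x
    · subst hx
      have ht : (PySem.Dict.mk t).get? kv.1 = none := by
        rw [PySem.Dict.get?_eq_none_iff_not_mem_keys]
        simpa using h.1
      rw [ht]
      simp only [BEq.rfl, if_true]
      have hstep : (pvMergeStep d kv).get? kv.1 = pvOmin (d.get? kv.1) (some kv.2) := by
        unfold pvMergeStep
        cases hg : d.get? kv.1 with
        | none => simp [pvOmin, PySem.Dict.get?_insert_self]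
        | some b =>
          by_cases hlt : kv.2 < b
          · simp [pvOmin, hlt, PySem.Dict.get?_insert_self]
          · simp [pvOmin, hlt, hg]
      rw [hstep]
      cases d.get? kv.1 <;> simp [pvOmin]
    · have hne : (kv.1 == x) = false := by simpa using hx
      have hstep : (pvMergeStep d kv).get? x = d.get? x := by
        unfold pvMergeStep
        cases d.get? kv.1 with
        | none => exact PySem.Dict.get?_insert_of_ne d kv.2 (Ne.symm hx)
        | some b =>
          by_cases hlt : kv.2 < b
          · simp only [hlt, if_true]
            exact PySem.Dict.get?_insert_of_ne d kv.2 (Ne.symm hx)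
          · simp [hlt]
      rw [hstep, hne]
      simp

lemma pv_outer_get (vals : List (List String)) (d : PySem.Dict String Int) (x : String) :
    ((vals.foldl (fun d lst => (pvRankMapOf lst).items.foldl pvMergeStep d) d).get? x)
      = vals.foldl (fun br lst => pvOmin br (pvLastIdx lst x)) (d.get? x) := by
  induction vals generalizing d with
  | nil => rfl
  | cons lst t ih =>
    simp only [List.foldl_cons, ih]
    congr 1
    have hnd : ((pvRankMapOf lst).items.map (·.1)).Nodup := by
      have := pv_rank_map_keys_nodup lst
      simpa [PySem.Dict.keys] using this
    rw [pv_merge_get _ _ _ hnd]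
    have hmk : PySem.Dict.mk (pvRankMapOf lst).items = pvRankMapOf lst := by
      apply PySem.Dict.ext; rfl
    rw [hmk, pv_rank_map_get]

lemma pv_bestRankA_eq (vals : List (List String)) (c : String) :
    pvBestRankA (vals.map pvRankMapOf) c
      = vals.foldl (fun br lst => pvOmin br (pvLastIdx lst c)) none := by
  unfold pvBestRankA
  rw [List.foldl_map]
  refine PySem.List.foldl_congr_mem vals _ _ none (fun br lst _ => ?_)
  rw [pv_rank_map_get]
  cases pvLastIdx lst c with
  | none => rfl
  | some r =>
    cases br with
    | none => rfl
    | some b => by_cases hlt : r < b <;> simp [pvOmin, hlt]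

lemma pv_cond_iff (r b1 : Int) (c b2 : String) :
    (r < b1 ∨ (r = b1 ∧ c < b2))
      ↔ ((decide (r < b1) || (!decide (b1 < r) && decide (c < b2))) = true) := by
  simp only [Bool.or_eq_true, decide_eq_true_eq, Bool.and_eq_true, Bool.not_eq_eq_eq_not,
    Bool.not_true, decide_eq_false_iff_not]
  constructor
  · rintro (h | ⟨he, hc⟩)
    · exact Or.inl h
    · exact Or.inr ⟨by omega, hc⟩
  · rintro (h | ⟨hnb, hc⟩)
    · exact Or.inl h
    · by_cases hr : r < b1
      · exact Or.inl hr
      · exact Or.inr ⟨by omega, hc⟩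

lemma pv_foldl_filterMap {α β γ : Type} (f : α → Option β) (g : γ → β → γ) (l : List α) (init : γ) :
    (l.filterMap f).foldl g init
      = l.foldl (fun acc a => match f a with | none => acc | some b => g acc b) init := by
  induction l generalizing init with
  | nil => rfl
  | cons a t ih =>
    cases h : f a with
    | none => simp [h, ih]
    | some b => simp [h, ih]

-- ===== VERDICT (by name: the statement is the Claim_ definition above) =====
theorem tie_break_by_party_order_spec : Claim_equal_tie_break_by_party_order := by
  intro tied pls _ _
  show tie_break_by_party_order tied pls = tie_break_by_party_order_alt tied pls
  unfold tie_break_by_party_order tie_break_by_party_order_alt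
  simp only
  set vals := (PySem.Dict.ofList pls).values with hvals
  set bk := vals.foldl (fun d lst => (pvRankMapOf lst).items.foldl pvMergeStep d)
      PySem.Dict.empty with hbk
  have hrmvals : (PySem.Dict.mk ((PySem.Dict.ofList pls).items.map
        (fun kv => (kv.1, pvRankMapOf kv.2)))).values = vals.map pvRankMapOf := by
    simp [PySem.Dict.values, hvals, List.map_map]
  have hbr : ∀ c, pvBestRankA (vals.map pvRankMapOf) c = bk.get? c := by
    intro c
    rw [pv_bestRankA_eq, hbk, pv_outer_get]
    rfl
  have hfold : tied.foldl (pvBestStepA (vals.map pvRankMapOf)) none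
      = PySem.List.min2? (tied.filterMap (fun c => (bk.get? c).map (fun r => (r, c))))
          (fun p => p.1) (fun p => p.2) := by
    show _ = (tied.filterMap (fun c => (bk.get? c).map (fun r => (r, c)))).foldl _ none
    rw [pv_foldl_filterMap]
    refine PySem.List.foldl_congr_mem tied _ _ none (fun best c _ => ?_)
    unfold pvBestStepA
    rw [hbr]
    cases bk.get? c with
    | none => rfl
    | some r =>
      cases best with
      | none => rfl
      | some b =>
        simp only [Option.map_some]
        by_cases h : r < b.1 ∨ (r = b.1 ∧ c < b.2)
        · rw [if_pos h, if_pos ((pv_cond_iff r b.1 c b.2).mp h)]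
        · rw [if_neg h, if_neg (fun hb => h ((pv_cond_iff r b.1 c b.2).mpr hb))]
  rw [hrmvals, hfold]
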